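-- pv_equiv track=rewrite | github.com/GDtoPlay/data_science | sql_filter.py | splitcheck
-- ===== SOURCE A (Python) =====
-- def splitcheck(origin_sql):    # ' ' 단위로 잘린 문자열의 str 청크 리스트에 대해서 각 청크에서 '(', ')', '+', '&', '=' 을 주위의 문자들과 분리시키는 작업  예) ['(select', 'from'] -> ['(', 'select', 'from']
--     sql = []
--     for chunk in origin_sql:
--         if ',' in chunk or '(' in chunk or ')' or '+' or '&' or '='in chunk:
--             start = 0
--             end = 0
--             for idx, char in enumerate(chunk):
--                 if char == ',':
--                     end = idx - 1
--                     if end >= 0: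
--                         if chunk[start:end + 1] != '':
--                             sql.append(chunk[start:end + 1])
--                     sql.append(',')
--                     start = idx + 1
--
--                 elif char == '(':
--                     end = idx - 1
--                     if end >= 0:
--                         if chunk[start:end + 1] != '':
--                             sql.append(chunk[start:end + 1])
--                     sql.append('(')
--                     start = idx + 1
--
--                 elif char == ')':
--                     end = idx - 1
--                     if end >= 0:
--                         if chunk[start:end + 1] != '':
--                             sql.append(chunk[start:end + 1])
--                     sql.append(')')
--                     start = idx + 1
--
--                 elif char == '=':
--                     end = idx - 1
--                     if end >= 0:
--                         if chunk[start:end + 1] != '':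
--                             sql.append(chunk[start:end + 1])
--                     sql.append('=')
--                     start = idx + 1
--
--                 elif char == '&':
--                     end = idx - 1
--                     if end >= 0:
--                         if chunk[start:end + 1] != '':
--                             sql.append(chunk[start:end + 1])
--                     sql.append('&')
--                     start = idx + 1
--
--                 elif char == '+':
--                     end = idx - 1
--                     if end >= 0:
--                         if chunk[start:end + 1] != '':
--                             sql.append(chunk[start:end + 1])
--                     sql.append('+')
--                     start = idx + 1
--
--             if start != len(chunk):
--                 sql.append(chunk[start:])
--
--         else:
--             sql.append(chunk)
--
--     return sql
-- ===== SOURCE B (Python) =====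
-- import re
--
-- _DELIM_SPLIT = re.compile(r'([,()=&+])')
--
-- def splitcheck(origin_sql):
--     sql = []
--     for chunk in origin_sql:
--         for part in _DELIM_SPLIT.split(chunk):
--             if part:
--                 sql.append(part)
--     return sql
-- ===== Notes on version B (the rewrite author's own statement) =====
-- stated objective: idiomatic
-- what changed: Replaced the per-character index/slice bookkeeping with six identical elif branches by a single re.split on a captured delimiter class followed by an empty-string filter.
import Mathlib
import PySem

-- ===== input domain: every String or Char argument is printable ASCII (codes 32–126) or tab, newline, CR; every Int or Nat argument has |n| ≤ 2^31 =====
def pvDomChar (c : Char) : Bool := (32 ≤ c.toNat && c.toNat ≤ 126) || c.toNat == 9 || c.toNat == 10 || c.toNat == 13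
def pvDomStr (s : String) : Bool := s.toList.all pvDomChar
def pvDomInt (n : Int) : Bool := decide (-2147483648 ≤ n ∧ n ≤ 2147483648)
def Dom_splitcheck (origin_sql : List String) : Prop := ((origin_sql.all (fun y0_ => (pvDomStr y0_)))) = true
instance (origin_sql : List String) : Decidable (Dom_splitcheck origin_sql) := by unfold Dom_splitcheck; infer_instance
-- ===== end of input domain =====

-- B replaces A's per-character index/slice bookkeeping (six identical elif branches) by a
-- regex-style split on the delimiter class followed by an empty-string filter (idiomatic; same cost).

-- ===== PORT A =====
-- one step of A's inner 'for idx, char in enumerate(chunk)' loop; state = (start, sql)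
def splitcheckStepA (chunk : String) (st : Int × List String) (ic : Int × Char) : Int × List String :=
  let start := st.1
  let sql := st.2
  let idx := ic.1
  let char := ic.2
  if char = ',' then
    let e := idx - 1
    let sql := if 0 ≤ e then
        (if PySem.Str.slice chunk (some start) (some (e + 1)) ≠ "" then
          sql ++ [PySem.Str.slice chunk (some start) (some (e + 1))] else sql) else sql
    (idx + 1, sql ++ [","])
  else if char = '(' then
    let e := idx - 1
    let sql := if 0 ≤ e then
        (if PySem.Str.slice chunk (some start) (some (e + 1)) ≠ "" then
          sql ++ [PySem.Str.slice chunk (some start) (some (e + 1))] else sql) else sql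
    (idx + 1, sql ++ ["("])
  else if char = ')' then
    let e := idx - 1
    let sql := if 0 ≤ e then
        (if PySem.Str.slice chunk (some start) (some (e + 1)) ≠ "" then
          sql ++ [PySem.Str.slice chunk (some start) (some (e + 1))] else sql) else sql
    (idx + 1, sql ++ [")"])
  else if char = '=' then
    let e := idx - 1
    let sql := if 0 ≤ e then
        (if PySem.Str.slice chunk (some start) (some (e + 1)) ≠ "" then
          sql ++ [PySem.Str.slice chunk (some start) (some (e + 1))] else sql) else sql
    (idx + 1, sql ++ ["="])
  else if char = '&' then
    let e := idx - 1
    let sql := if 0 ≤ e then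
        (if PySem.Str.slice chunk (some start) (some (e + 1)) ≠ "" then
          sql ++ [PySem.Str.slice chunk (some start) (some (e + 1))] else sql) else sql
    (idx + 1, sql ++ ["&"])
  else if char = '+' then
    let e := idx - 1
    let sql := if 0 ≤ e then
        (if PySem.Str.slice chunk (some start) (some (e + 1)) ≠ "" then
          sql ++ [PySem.Str.slice chunk (some start) (some (e + 1))] else sql) else sql
    (idx + 1, sql ++ ["+"])
  else st

-- A's trailing 'if start != len(chunk): sql.append(chunk[start:])'
def splitcheckFinishA (chunk : String) (st : Int × List String) : List String :=
  if st.1 ≠ (PySem.Str.len chunk : Int) then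
    st.2 ++ [PySem.Str.slice chunk (some st.1) none]
  else st.2

def splitcheck (origin_sql : List String) : List String :=
  origin_sql.foldl (fun sql chunk =>
    -- Python: "if ',' in chunk or '(' in chunk or ')' or '+' or '&' or '=' in chunk" —
    -- the bare truthy string literal ')' makes the condition always True; kept literally.
    if PySem.Str.isIn "," chunk || PySem.Str.isIn "(" chunk || true then
      splitcheckFinishA chunk
        ((PySem.List.enumerate chunk.toList 0).foldl (splitcheckStepA chunk) (0, sql))
    else sql ++ [chunk]) []

-- ===== PORT B =====
def splitcheckIsDelim (c : Char) : Bool :=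
  c = ',' || c = '(' || c = ')' || c = '=' || c = '&' || c = '+'

-- hand port of re.split(r'([,()=&+])', chunk): pieces of non-delimiter text interleaved
-- with the captured one-char delimiters (first and last piece may be empty)
def splitcheckReSplit : List Char → List (List Char)
  | [] => [[]]
  | c :: rest =>
    if splitcheckIsDelim c then [] :: [c] :: splitcheckReSplit rest
    else
      match splitcheckReSplit rest with
      | p :: ps => (c :: p) :: ps
      | [] => [[c]]

def splitcheck_alt (origin_sql : List String) : List String :=
  origin_sql.foldl (fun sql chunk =>
    (splitcheckReSplit chunk.toList).foldl
      (fun sql part => if part ≠ [] then sql ++ [String.ofList part] else sql) sql) []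

-- ===== PRECONDITION & SPEC =====
def Spec_splitcheck (origin_sql : List String) (out : List String) : Prop := out = splitcheck_alt origin_sql
instance (origin_sql : List String) (out : List String) : Decidable (Spec_splitcheck origin_sql out) := by unfold Spec_splitcheck; infer_instance

-- ===== CLAIM (what is proved, stated in full; the proofs are below) =====
def Claim_equal_splitcheck : Prop := ∀ (origin_sql : List String), Dom_splitcheck origin_sql → Spec_splitcheck origin_sql (splitcheck origin_sql)

-- ===== LEMMAS AND PROOFS =====

-- the token list both programs produce for one chunk, with a pending text prefix
def splitcheckTokens : List Char → List Char → List (List Char)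
  | pending, [] => if pending = [] then [] else [pending]
  | pending, c :: rest =>
    if splitcheckIsDelim c then
      (if pending = [] then [] else [pending]) ++ [c] :: splitcheckTokens [] rest
    else splitcheckTokens (pending ++ [c]) rest

theorem splitcheck_ofList_eq_empty_iff (l : List Char) : String.ofList l = "" ↔ l = [] := by
  constructor
  · intro h
    have := congrArg String.toList h
    simpa using this
  · intro h; subst h; rfl

theorem splitcheckReSplit_ne_nil (cs : List Char) : splitcheckReSplit cs ≠ [] := by
  cases cs with
  | nil => simp [splitcheckReSplit]
  | cons c rest =>
    simp only [splitcheckReSplit]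
    split
    · simp
    · split <;> simp

theorem splitcheckReSplit_filter (cs : List Char) : ∀ (pending p : List Char)
    (ps : List (List Char)), splitcheckReSplit cs = p :: ps →
    ((pending ++ p) :: ps).filter (fun part => decide (part ≠ []))
      = splitcheckTokens pending cs := by
  induction cs with
  | nil =>
    intro pending p ps h
    simp only [splitcheckReSplit] at h
    obtain ⟨rfl, rfl⟩ : p = [] ∧ ps = [] := by cases h; exact ⟨rfl, rfl⟩
    by_cases hp : pending = [] <;> simp [hp, splitcheckTokens, List.filter]
  | cons c rest ih =>
    intro pending p ps h
    simp only [splitcheckReSplit] at h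
    obtain ⟨q, qs, hq⟩ : ∃ q qs, splitcheckReSplit rest = q :: qs := by
      cases hrs : splitcheckReSplit rest with
      | nil => exact absurd hrs (splitcheckReSplit_ne_nil rest)
      | cons q qs => exact ⟨q, qs, rfl⟩
    by_cases hd : splitcheckIsDelim c
    · rw [if_pos hd] at h
      obtain ⟨rfl, rfl⟩ : p = [] ∧ ps = [c] :: splitcheckReSplit rest := by
        cases h; exact ⟨rfl, rfl⟩
      have hfilt : (splitcheckReSplit rest).filter (fun part => decide (part ≠ []))
          = splitcheckTokens [] rest := by
        rw [hq]
        simpa using ih [] q qs hq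
      simp only [splitcheckTokens, hd, if_true, List.append_nil]
      rw [List.filter_cons, List.filter_cons, hfilt]
      by_cases hp : pending = [] <;> simp [hp]
    · rw [if_neg hd] at h
      rw [hq] at h
      have := ih (pending ++ [c]) q qs hq
      obtain ⟨rfl, rfl⟩ : p = c :: q ∧ ps = qs := by cases h; exact ⟨rfl, rfl⟩
      simp only [List.append_assoc, List.singleton_append] at this
      rw [this]
      simp [splitcheckTokens, hd]

theorem splitcheck_A_fold (chunk : String) (rest : List Char) : ∀ (s k : Nat) (sql : List String),
    rest = chunk.toList.drop k → s ≤ k → k ≤ chunk.toList.length →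
    splitcheckFinishA chunk
        ((PySem.List.enumerate rest (k : Int)).foldl (splitcheckStepA chunk) ((s : Int), sql))
      = sql ++ (splitcheckTokens ((chunk.toList.drop s).take (k - s)) rest).map String.ofList := by
  induction rest with
  | nil =>
    intro s k sql hrest hs hk
    have hlen2 : chunk.toList.length = chunk.length := by simp
    have hkl : k = chunk.toList.length := by
      have := congrArg List.length hrest
      simp [List.length_drop] at this
      omega
    subst hkl
    simp only [PySem.List.enumerate_nil, List.foldl_nil, splitcheckFinishA, splitcheckTokens]
    have htake : (chunk.toList.drop s).take (chunk.toList.length - s) = chunk.toList.drop s := by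
      apply List.take_of_length_le; simp
    rw [htake]
    have hlenI : PySem.Str.len chunk = ((chunk.toList.length : Nat) : Int) := by
      simp [pysem]
    by_cases hse : s = chunk.toList.length
    · subst hse
      simp
    · have h1 : ((s : Int)) ≠ PySem.Str.len chunk := by
        rw [hlenI]; exact_mod_cast hse
      have h2 : chunk.toList.drop s ≠ [] := by
        simp only [ne_eq, List.drop_eq_nil_iff]
        omega
      rw [if_pos h1, if_neg h2]
      congr 1
      have : PySem.Str.slice chunk (some (s : Int)) none = String.ofList (chunk.toList.drop s) := by
        apply String.ext
        simp [pysem, PySem.List.slice_from_natCast]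
      simp [this]
  | cons c rest ih =>
    intro s k sql hrest hs hk
    have hlen2 : chunk.toList.length = chunk.length := by simp
    have hrest' : rest = chunk.toList.drop (k + 1) := by
      have := congrArg List.tail hrest
      simpa [List.tail_drop] using this
    have hk1 : k + 1 ≤ chunk.toList.length := by
      have : chunk.toList.length - k = (c :: rest).length := by
        rw [hrest]; simp
      simp at this; omega
    have hslice : PySem.Str.slice chunk (some (s : Int)) (some (((k : Int) - 1) + 1))
        = String.ofList ((chunk.toList.drop s).take (k - s)) := by
      apply String.ext
      have h0 : ((k : Int) - 1) + 1 = ((k : Nat) : Int) := by ring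
      rw [h0]
      simp [pysem, PySem.List.slice_natCast]
    have hemp : (PySem.Str.slice chunk (some (s : Int)) (some (((k : Int) - 1) + 1)) = "")
        ↔ (chunk.toList.drop s).take (k - s) = [] := by
      rw [hslice, splitcheck_ofList_eq_empty_iff]
    rw [PySem.List.enumerate_cons, List.foldl_cons]
    by_cases hd : splitcheckIsDelim c
    · -- the six delimiter branches all take the same shape
      have hstep : splitcheckStepA chunk ((s : Int), sql) ((k : Int), c)
          = ((k : Int) + 1,
              (if 0 ≤ (k : Int) - 1 then
                (if PySem.Str.slice chunk (some (s : Int)) (some (((k : Int) - 1) + 1)) ≠ "" then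
                  sql ++ [PySem.Str.slice chunk (some (s : Int)) (some (((k : Int) - 1) + 1))]
                 else sql) else sql) ++ [String.ofList [c]]) := by
        simp only [splitcheckIsDelim, Bool.or_eq_true, decide_eq_true_eq] at hd
        rcases hd with ((((h | h) | h) | h) | h) | h <;> subst h <;>
          simp [splitcheckStepA]
      rw [hstep]
      have hrec := ih (k + 1) (k + 1)
        ((if 0 ≤ (k : Int) - 1 then
            (if PySem.Str.slice chunk (some (s : Int)) (some (((k : Int) - 1) + 1)) ≠ "" then
              sql ++ [PySem.Str.slice chunk (some (s : Int)) (some (((k : Int) - 1) + 1))]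
             else sql) else sql) ++ [String.ofList [c]])
        hrest' (le_refl _) hk1
      have hcast : ((k : Int) + 1) = (((k + 1 : Nat) : Int)) := by push_cast; ring
      rw [hcast, hrec]
      rw [show splitcheckTokens ((chunk.toList.drop s).take (k - s)) (c :: rest)
          = (if (chunk.toList.drop s).take (k - s) = [] then []
              else [(chunk.toList.drop s).take (k - s)]) ++ [c] :: splitcheckTokens [] rest
        from by simp [splitcheckTokens, hd]]
      simp only [Nat.sub_self, List.take_zero]
      by_cases hk0 : k = 0
      · subst hk0
        have hs0 : s = 0 := by omega
        subst hs0
        simp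
      · have hge : (0 : Int) ≤ (k : Int) - 1 := by omega
        rw [if_pos hge]
        by_cases hpe : (chunk.toList.drop s).take (k - s) = []
        · rw [if_neg (fun hn => hn (hemp.mpr hpe)), if_pos hpe]
          simp
        · have hcond : PySem.Str.slice chunk (some (s : Int)) (some (((k : Int) - 1) + 1)) ≠ "" :=
            fun h => hpe (hemp.mp h)
          rw [if_pos hcond, hslice, if_neg hpe]
          simp
    · have hstep : splitcheckStepA chunk ((s : Int), sql) ((k : Int), c) = ((s : Int), sql) := by
        simp only [splitcheckIsDelim, Bool.or_eq_true, decide_eq_true_eq] at hd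
        push Not at hd
        obtain ⟨⟨⟨⟨⟨h1, h2⟩, h3⟩, h4⟩, h5⟩, h6⟩ := hd
        simp [splitcheckStepA, h1, h2, h3, h4, h5, h6]
      rw [hstep]
      have hrec := ih s (k + 1) sql hrest' (by omega) hk1
      have hcast : ((k : Int) + 1) = (((k + 1 : Nat) : Int)) := by push_cast; ring
      rw [hcast, hrec]
      rw [show splitcheckTokens ((chunk.toList.drop s).take (k - s)) (c :: rest)
          = splitcheckTokens (((chunk.toList.drop s).take (k - s)) ++ [c]) rest
        from by simp [splitcheckTokens, hd]]
      congr 3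
      have hck : chunk.toList[k]? = some c := by
        have := congrArg (fun l => l[0]?) hrest
        simpa [List.getElem?_drop] using this.symm
      have : (chunk.toList.drop s).take (k + 1 - s)
          = (chunk.toList.drop s).take (k - s) ++ [c] := by
        have h1 : k + 1 - s = (k - s) + 1 := by omega
        rw [h1, List.take_add_one]
        congr 1
        have : (chunk.toList.drop s)[k - s]? = some c := by
          rw [List.getElem?_drop]
          rw [show s + (k - s) = k from by omega]
          exact hck
        simp [this]
      rw [this]

theorem splitcheck_chunk_eq (sql : List String) (chunk : String) :
    (if PySem.Str.isIn "," chunk || PySem.Str.isIn "(" chunk || true then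
      splitcheckFinishA chunk
        ((PySem.List.enumerate chunk.toList 0).foldl (splitcheckStepA chunk) (0, sql))
    else sql ++ [chunk])
    = (splitcheckReSplit chunk.toList).foldl
        (fun sql part => if part ≠ [] then sql ++ [String.ofList part] else sql) sql := by
  rw [if_pos (by simp)]
  obtain ⟨p, ps, hp⟩ : ∃ p ps, splitcheckReSplit chunk.toList = p :: ps := by
    cases hrs : splitcheckReSplit chunk.toList with
    | nil => exact absurd hrs (splitcheckReSplit_ne_nil chunk.toList)
    | cons p ps => exact ⟨p, ps, rfl⟩
  have hfilter := splitcheckReSplit_filter chunk.toList [] p ps hp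
  simp only [List.nil_append] at hfilter
  rw [hp, PySem.List.foldl_append_ite (p := fun part => part ≠ []) (f := String.ofList),
    hfilter]
  have hA := splitcheck_A_fold chunk chunk.toList 0 0 sql rfl (le_refl 0) (by omega)
  simpa using hA

-- ===== VERDICT (by name: the statement is the Claim_ definition above) =====
theorem splitcheck_spec : Claim_equal_splitcheck := by
  intro origin_sql _
  unfold Spec_splitcheck splitcheck splitcheck_alt
  apply PySem.List.foldl_congr_mem
  intro sql chunk _
  exact splitcheck_chunk_eq sql chunk
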